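-- pv_equiv track=rewrite | github.com/susunini/leetcode | LintCode_Maximum_Subarray_II.py | maxTwoSubArrays
-- ===== SOURCE A (Python) =====
-- def maxTwoSubArrays(nums):
--     """
--     @param nums: A list of integers
--     @return: An integer denotes the sum of max two non-overlapping subarrays
--     """
--     n = len(nums)
--     maxLeftToRight = [0]*n
--     maxRightToLeft = [0]*n
--     maxLeftToRight[0] = nums[0]
--     for i in range(1, n):
--         maxLeftToRight[i] = max(0, maxLeftToRight[i-1]) + nums[i]
--     for i in range(1, n):
--         maxLeftToRight[i] = max(maxLeftToRight[i-1], maxLeftToRight[i])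
--     maxRightToLeft[-1] = nums[-1]
--     for i in range(n-2, -1, -1):
--         maxRightToLeft[i] = max(0, maxRightToLeft[i+1]) + nums[i]
--     for i in range(n-2, -1, -1):
--         maxRightToLeft[i] = max(maxRightToLeft[i+1], maxRightToLeft[i])
--     result = 0
--     for i in range(n-1):
--         result = max(result, maxLeftToRight[i]+maxRightToLeft[i+1])
--     return result
-- ===== SOURCE B (Python) =====
-- def maxTwoSubArrays(nums):
--     """
--     @param nums: A list of integers
--     @return: An integer denotes the sum of max two non-overlapping subarrays
--     """
--     cur1 = best1 = nums[0]
--     cur2 = best2 = None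
--     for x in nums[1:]:
--         # second subarray ends at x; best1 is still the best over the PREVIOUS prefix
--         cur2 = x + (best1 if cur2 is None else max(cur2, best1))
--         best2 = cur2 if best2 is None else max(best2, cur2)
--         cur1 = max(cur1, 0) + x
--         best1 = max(best1, cur1)
--     return 0 if best2 is None else max(0, best2)
-- ===== Notes on version B (the rewrite author's own statement) =====
-- stated objective: faster
-- what changed: Replaced the five-pass prefix/suffix array construction by a single forward two-subarray Kadane DP that keeps only four scalars (best/current first subarray, best/current pair), with no auxiliary arrays.
import Mathlib
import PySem

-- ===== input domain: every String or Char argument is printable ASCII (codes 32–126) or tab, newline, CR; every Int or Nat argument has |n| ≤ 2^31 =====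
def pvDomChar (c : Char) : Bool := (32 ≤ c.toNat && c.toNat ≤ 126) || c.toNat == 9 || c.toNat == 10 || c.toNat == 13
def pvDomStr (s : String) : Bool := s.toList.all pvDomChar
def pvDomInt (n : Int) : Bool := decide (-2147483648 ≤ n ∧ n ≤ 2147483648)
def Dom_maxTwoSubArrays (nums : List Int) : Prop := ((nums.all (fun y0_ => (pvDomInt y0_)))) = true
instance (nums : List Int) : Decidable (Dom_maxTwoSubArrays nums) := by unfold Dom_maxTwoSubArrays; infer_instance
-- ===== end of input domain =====

-- B replaces A's five passes over three auxiliary arrays by a single forward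
-- two-subarray Kadane pass keeping four scalars (objective: faster, constant-factor).

-- ===== PORT A =====
def maxTwoSubArrays (nums : List Int) : Int :=
  let n : Int := (nums.length : Int)
  let mL0 : List Int := List.replicate nums.length 0
  let mR0 : List Int := List.replicate nums.length 0
  let mL1 : List Int := PySem.List.pySetD mL0 0 (PySem.List.pyGetD nums 0 0)
  let mL2 : List Int := (PySem.List.pyRange 1 n 1).foldl (fun mL i =>
      PySem.List.pySetD mL i (max 0 (PySem.List.pyGetD mL (i-1) 0) + PySem.List.pyGetD nums i 0)) mL1
  let mL3 : List Int := (PySem.List.pyRange 1 n 1).foldl (fun mL i =>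
      PySem.List.pySetD mL i (max (PySem.List.pyGetD mL (i-1) 0) (PySem.List.pyGetD mL i 0))) mL2
  let mR1 : List Int := PySem.List.pySetD mR0 (-1) (PySem.List.pyGetD nums (-1) 0)
  let mR2 : List Int := (PySem.List.pyRange (n-2) (-1) (-1)).foldl (fun mR i =>
      PySem.List.pySetD mR i (max 0 (PySem.List.pyGetD mR (i+1) 0) + PySem.List.pyGetD nums i 0)) mR1
  let mR3 : List Int := (PySem.List.pyRange (n-2) (-1) (-1)).foldl (fun mR i =>
      PySem.List.pySetD mR i (max (PySem.List.pyGetD mR (i+1) 0) (PySem.List.pyGetD mR i 0))) mR2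
  (PySem.List.pyRange 0 (n-1) 1).foldl (fun result i =>
      max result (PySem.List.pyGetD mL3 i 0 + PySem.List.pyGetD mR3 (i+1) 0)) 0

-- ===== PORT B =====
-- one step of Source B's loop body (state: cur1, best1, cur2, best2)
def altStep (st : Int × Int × Option Int × Option Int) (x : Int) : Int × Int × Option Int × Option Int :=
  let cur2 : Int := x + (match st.2.2.1 with | none => st.2.1 | some c => max c st.2.1)
  let best2 : Int := match st.2.2.2 with | none => cur2 | some b => max b cur2
  let cur1 : Int := max st.1 0 + x
  let best1 : Int := max st.2.1 cur1
  (cur1, best1, some cur2, some best2)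

def maxTwoSubArrays_alt (nums : List Int) : Int :=
  match nums with
  | [] => 0   -- Source B raises IndexError on [] (nums[0]); excluded by Pre_
  | a :: rest =>
    let st := rest.foldl altStep (a, a, (none : Option Int), (none : Option Int))
    match st.2.2.2 with
    | none => 0
    | some b => max 0 b

-- ===== PRECONDITION & SPEC =====
-- Pre_ excludes only the empty list, on which both A and B raise IndexError (nums[0]).
def Pre_maxTwoSubArrays (nums : List Int) : Prop := nums ≠ []
instance (nums : List Int) : Decidable (Pre_maxTwoSubArrays nums) := by
  unfold Pre_maxTwoSubArrays; infer_instance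

def pvWitness_maxTwoSubArrays : List Int := [1, -2, 3]

def Spec_maxTwoSubArrays (nums : List Int) (out : Int) : Prop := out = maxTwoSubArrays_alt nums
instance (nums : List Int) (out : Int) : Decidable (Spec_maxTwoSubArrays nums out) := by
  unfold Spec_maxTwoSubArrays; infer_instance

-- ===== CLAIM (what is proved, stated in full; the proofs are below) =====
def Claim_equal_maxTwoSubArrays : Prop := ∀ (nums : List Int), Dom_maxTwoSubArrays nums → Pre_maxTwoSubArrays nums → Spec_maxTwoSubArrays nums (maxTwoSubArrays nums)

-- ===== LEMMAS AND PROOFS =====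

-- ---- proof-side functional descriptions of A's arrays ----

-- values of maxLeftToRight after the first pass (Kadane "current" scan);
-- c is the value at the previous index
def kl (c : Int) : List Int → List Int
  | [] => []
  | x :: xs => (max 0 c + x) :: kl (max 0 c + x) xs

-- running prefix maximum (second pass); c is the value at the previous index
def pm (c : Int) : List Int → List Int
  | [] => []
  | x :: xs => max c x :: pm (max c x) xs

-- values of maxRightToLeft after the third pass (Kadane scan from the right)
def kr : List Int → List Int
  | [] => []
  | x :: xs => (max 0 ((kr xs).getD 0 0) + x) :: kr xs

-- running suffix maximum (fourth pass)
def smx : List Int → List Int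
  | [] => []
  | y :: ys => max ((smx ys).getD 0 y) y :: smx ys

-- B's fold
def bFold (a : Int) (t : List Int) : Int × Int × Option Int × Option Int :=
  t.foldl altStep (a, a, (none : Option Int), (none : Option Int))

-- ---- the values both programs maximise, as predicates ----

-- v is the sum of a nonempty suffix of l
def SufV (l : List Int) (v : Int) : Prop := ∃ j : Nat, j < l.length ∧ v = (l.drop j).sum
-- v is the sum of a nonempty prefix of l
def PreV (l : List Int) (v : Int) : Prop := ∃ k : Nat, 1 ≤ k ∧ k ≤ l.length ∧ v = (l.take k).sum
-- v is the sum of a nonempty contiguous sublist of l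
def SubV (l : List Int) (v : Int) : Prop :=
  ∃ j k : Nat, 1 ≤ k ∧ j + k ≤ l.length ∧ v = ((l.drop j).take k).sum
-- v = (sum of a sublist of l before position m) + (sum of the suffix of l from m)
def Pair2V (l : List Int) (v : Int) : Prop :=
  ∃ m s, m < l.length ∧ SubV (l.take m) s ∧ v = s + (l.drop m).sum
-- v is the sum of two disjoint nonempty sublists of l, in order
def PairV (l : List Int) (v : Int) : Prop :=
  ∃ m s t, m ≤ l.length ∧ SubV (l.take m) s ∧ SubV (l.drop m) t ∧ v = s + t

def MaxOf (v : Int) (P : Int → Prop) : Prop := P v ∧ ∀ w, P w → w ≤ v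

-- ---- generic MaxOf lemmas ----

theorem maxOf_congr {v : Int} {P Q : Int → Prop} (h : ∀ z, P z ↔ Q z) (hv : MaxOf v P) :
    MaxOf v Q := ⟨(h v).1 hv.1, fun w hw => hv.2 w ((h w).2 hw)⟩

theorem maxOf_or {v w : Int} {P Q : Int → Prop} (hv : MaxOf v P) (hw : MaxOf w Q) :
    MaxOf (max v w) (fun z => P z ∨ Q z) := by
  constructor
  · rcases le_total v w with h | h
    · simp [max_eq_right h]; right; exact hw.1
    · simp [max_eq_left h]; left; exact hv.1
  · rintro z (hz | hz)
    · exact le_trans (hv.2 z hz) (le_max_left _ _)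
    · exact le_trans (hw.2 z hz) (le_max_right _ _)

theorem maxOf_or_left_empty {w : Int} {P Q : Int → Prop} (hP : ∀ y, ¬ P y) (hw : MaxOf w Q) :
    MaxOf w (fun z => P z ∨ Q z) :=
  ⟨Or.inr hw.1, by rintro z (hz | hz) <;> [exact absurd hz (hP z); exact hw.2 z hz]⟩

theorem maxOf_add {v x : Int} {P : Int → Prop} (hv : MaxOf v P) :
    MaxOf (v + x) (fun z => ∃ y, P y ∧ z = y + x) := by
  refine ⟨⟨v, hv.1, rfl⟩, ?_⟩
  rintro z ⟨y, hy, rfl⟩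
  have := hv.2 y hy
  omega

-- ---- structural lemmas about the predicates ----

theorem not_SubV_nil (v : Int) : ¬ SubV [] v := by
  rintro ⟨j, k, hk, hjk, _⟩; simp at hjk; omega

theorem SubV_ne_nil {l : List Int} {v : Int} (h : SubV l v) : l ≠ [] := by
  rintro rfl; exact not_SubV_nil v h

theorem sufV_singleton (x : Int) (v : Int) : SufV [x] v ↔ v = x := by
  constructor
  · rintro ⟨j, hj, rfl⟩
    have : j = 0 := by simpa using hj
    subst this; simp
  · rintro rfl; exact ⟨0, by simp⟩

theorem subV_singleton (x : Int) (v : Int) : SubV [x] v ↔ v = x := by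
  constructor
  · rintro ⟨j, k, hk, hjk, rfl⟩
    simp at hjk
    have hj : j = 0 := by omega
    have hk1 : k = 1 := by omega
    subst hj hk1; simp
  · rintro rfl; exact ⟨0, 1, by simp⟩

theorem preV_singleton (x : Int) (v : Int) : PreV [x] v ↔ v = x := by
  constructor
  · rintro ⟨k, h1, h2, rfl⟩
    have : k = 1 := by simp at h2; omega
    subst this; simp
  · rintro rfl; exact ⟨1, by simp⟩

theorem sufV_snoc (l : List Int) (x : Int) (v : Int) :
    SufV (l ++ [x]) v ↔ ∃ y, (y = 0 ∨ SufV l y) ∧ v = y + x := by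
  constructor
  · rintro ⟨j, hj, rfl⟩
    simp at hj
    rcases Nat.lt_or_ge j l.length with h | h
    · refine ⟨(l.drop j).sum, Or.inr ⟨j, h, rfl⟩, ?_⟩
      rw [List.drop_append_of_le_length (le_of_lt h), List.sum_append]
      simp
    · have hj' : j = l.length := by omega
      subst hj'
      refine ⟨0, Or.inl rfl, ?_⟩
      rw [List.drop_append_of_le_length le_rfl]
      simp
  · rintro ⟨y, (rfl | ⟨j, hj, rfl⟩), rfl⟩
    · refine ⟨l.length, by simp, ?_⟩
      rw [List.drop_append_of_le_length le_rfl]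
      simp
    · refine ⟨j, by simp; omega, ?_⟩
      rw [List.drop_append_of_le_length (le_of_lt hj), List.sum_append]
      simp

theorem subV_snoc (l : List Int) (x : Int) (v : Int) :
    SubV (l ++ [x]) v ↔ SubV l v ∨ SufV (l ++ [x]) v := by
  constructor
  · rintro ⟨j, k, hk, hjk, rfl⟩
    simp at hjk
    rcases Nat.lt_or_ge (j + k) (l.length + 1) with h | h
    · left
      refine ⟨j, k, hk, by omega, ?_⟩
      rw [List.drop_append_of_le_length (by omega), List.take_append_of_le_length (by simp; omega)]
    · have hjk' : j + k = l.length + 1 := by omega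
      right
      refine ⟨j, by simp; omega, ?_⟩
      rw [List.take_of_length_le (by simp; omega)]
  · rintro (⟨j, k, hk, hjk, rfl⟩ | ⟨j, hj, rfl⟩)
    · refine ⟨j, k, hk, by simp; omega, ?_⟩
      rw [List.drop_append_of_le_length (by omega), List.take_append_of_le_length (by simp; omega)]
    · simp at hj
      refine ⟨j, l.length + 1 - j, by omega, by simp; omega, ?_⟩
      rw [List.take_of_length_le (by simp)]

theorem preV_cons (x : Int) (xs : List Int) (v : Int) :
    PreV (x :: xs) v ↔ ∃ y, (y = 0 ∨ PreV xs y) ∧ v = y + x := by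
  constructor
  · rintro ⟨k, hk1, hk2, rfl⟩
    rcases k with _ | k
    · omega
    · rw [List.take_succ_cons, List.sum_cons]
      rcases Nat.eq_zero_or_pos k with rfl | hkp
      · exact ⟨0, Or.inl rfl, by simp⟩
      · refine ⟨(xs.take k).sum, Or.inr ⟨k, hkp, ?_, rfl⟩, by ring⟩
        simp at hk2; omega
  · rintro ⟨y, (rfl | ⟨k, hk1, hk2, rfl⟩), rfl⟩
    · exact ⟨1, le_rfl, by simp, by simp⟩
    · refine ⟨k + 1, by omega, by simp; omega, ?_⟩
      rw [List.take_succ_cons, List.sum_cons]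
      ring

theorem subV_cons (x : Int) (xs : List Int) (v : Int) :
    SubV (x :: xs) v ↔ PreV (x :: xs) v ∨ SubV xs v := by
  constructor
  · rintro ⟨j, k, hk, hjk, rfl⟩
    rcases j with _ | j
    · left
      exact ⟨k, hk, by simpa using hjk, by simp⟩
    · right
      exact ⟨j, k, hk, by simp at hjk; omega, by simp⟩
  · rintro (⟨k, hk1, hk2, rfl⟩ | ⟨j, k, hk, hjk, rfl⟩)
    · exact ⟨0, k, hk1, by simpa using hk2, by simp⟩
    · exact ⟨j + 1, k, hk, by simp; omega, by simp⟩

theorem not_pair2V_short {l : List Int} (h : l.length ≤ 1) (v : Int) : ¬ Pair2V l v := by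
  rintro ⟨m, s, hm, hs, _⟩
  have hne := SubV_ne_nil hs
  have hm0 : m = 0 := by omega
  subst hm0; simp at hne

theorem not_pairV_short {l : List Int} (h : l.length ≤ 1) (v : Int) : ¬ PairV l v := by
  rintro ⟨m, s, t, hm, hs, ht, _⟩
  have h1 := SubV_ne_nil hs
  have h2 := SubV_ne_nil ht
  have hm1 : 1 ≤ m := by
    rcases Nat.eq_zero_or_pos m with rfl | hp
    · simp at h1
    · exact hp
  have hm2 : m < l.length := by
    by_contra hc
    exact h2 (by rw [List.drop_eq_nil_iff]; omega)
  omega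

theorem subV_append (l e : List Int) (v : Int) (h : SubV l v) : SubV (l ++ e) v := by
  rcases h with ⟨j, k, hk, hjk, rfl⟩
  refine ⟨j, k, hk, by simp; omega, ?_⟩
  rw [List.drop_append_of_le_length (by omega), List.take_append_of_le_length (by simp; omega)]

theorem subV_take_mono {l : List Int} {m m' : Nat} {v : Int} (h : SubV (l.take m) v)
    (hmm : m ≤ m') : SubV (l.take m') v := by
  have : l.take m' = l.take m ++ (l.drop m).take (m' - m) := by
    rw [← List.take_add]
    congr 1
    omega
  rw [this]
  exact subV_append _ _ _ h

theorem pair2V_snoc (l : List Int) (x : Int) (v : Int) :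
    Pair2V (l ++ [x]) v ↔ ∃ y, (Pair2V l y ∨ SubV l y) ∧ v = y + x := by
  constructor
  · rintro ⟨m, s, hm, hs, rfl⟩
    simp at hm
    rcases Nat.lt_or_ge m l.length with h | h
    · rw [List.take_append_of_le_length (le_of_lt h)] at hs
      refine ⟨s + (l.drop m).sum, Or.inl ⟨m, s, h, hs, rfl⟩, ?_⟩
      rw [List.drop_append_of_le_length (le_of_lt h), List.sum_append]
      simp; ring
    · have hm' : m = l.length := by omega
      subst hm'
      rw [List.take_append_of_le_length le_rfl, List.take_length] at hs
      refine ⟨s, Or.inr hs, ?_⟩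
      rw [List.drop_append_of_le_length le_rfl]
      simp
  · rintro ⟨y, (⟨m, s, hm, hs, rfl⟩ | hy), rfl⟩
    · refine ⟨m, s, by simp; omega, ?_, ?_⟩
      · rw [List.take_append_of_le_length (le_of_lt hm)]
        exact hs
      · rw [List.drop_append_of_le_length (le_of_lt hm), List.sum_append]
        simp; ring
    · refine ⟨l.length, y, by simp, ?_, ?_⟩
      · rw [List.take_append_of_le_length le_rfl, List.take_length]
        exact hy
      · rw [List.drop_append_of_le_length le_rfl]
        simp

theorem pairV_snoc (l : List Int) (x : Int) (v : Int) :
    PairV (l ++ [x]) v ↔ PairV l v ∨ Pair2V (l ++ [x]) v := by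
  constructor
  · rintro ⟨m, s, t, hm, hs, ht, rfl⟩
    rcases ht with ⟨j, k, hk, hjk, rfl⟩
    have hml : m ≤ l.length := by
      by_contra hc
      have : (l ++ [x]).drop m = [] := by rw [List.drop_eq_nil_iff]; simp; omega
      rw [this] at hjk
      simp at hjk
      omega
    have hdm : (l ++ [x]).drop m = l.drop m ++ [x] := List.drop_append_of_le_length hml
    have hjk' : j + k ≤ l.length + 1 - m := by
      rw [hdm] at hjk
      simp at hjk
      omega
    rw [List.take_append_of_le_length hml] at hs
    rcases Nat.lt_or_ge (m + j + k) (l.length + 1) with h | h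
    · left
      refine ⟨m, s, (((l.drop m).drop j).take k).sum, hml, hs, ⟨j, k, hk, by simp; omega, rfl⟩, ?_⟩
      have h2 : ((l ++ [x]).drop m).drop j = (l.drop m).drop j ++ [x] := by
        rw [hdm, List.drop_append_of_le_length (by simp; omega)]
      rw [h2, List.take_append_of_le_length (by simp; omega)]
    · right
      have hmj : m + j ≤ l.length := by omega
      have hs2 : SubV ((l ++ [x]).take m) s := by
        rw [List.take_append_of_le_length hml]; exact hs
      refine ⟨m + j, s, by simp; omega, subV_take_mono hs2 (Nat.le_add_right m j), ?_⟩
      have h2 : ((l ++ [x]).drop m).drop j = (l ++ [x]).drop (m + j) := by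
        rw [List.drop_drop]
      rw [h2, List.take_of_length_le (by simp; omega)]
  · rintro (⟨m, s, t, hm, hs, ht, rfl⟩ | ⟨m, s, hm, hs, rfl⟩)
    · refine ⟨m, s, t, by simp; omega, ?_, ?_, rfl⟩
      · rw [List.take_append_of_le_length hm]
        exact hs
      · rw [List.drop_append_of_le_length hm]
        exact subV_append _ _ _ ht
    · refine ⟨m, s, ((l ++ [x]).drop m).sum, ?_, hs, ?_, rfl⟩
      · simp at hm ⊢; omega
      · refine ⟨0, (l ++ [x]).length - m, by simp at hm ⊢; omega, by simp, ?_⟩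
        rw [List.drop_zero, List.take_of_length_le (by simp)]

theorem maxOf_suf_step {l : List Int} {c x : Int} (hc : MaxOf c (SufV l)) :
    MaxOf (max 0 c + x) (SufV (l ++ [x])) := by
  have h0 : MaxOf (max 0 c) (fun y => y = 0 ∨ SufV l y) :=
    maxOf_or ⟨rfl, fun w hw => le_of_eq hw⟩ hc
  exact maxOf_congr (fun z => (sufV_snoc l x z).symm) (maxOf_add h0)

theorem maxOf_sub_step {l : List Int} {b c' x : Int} (hb : MaxOf b (SubV l))
    (hc : MaxOf c' (SufV (l ++ [x]))) : MaxOf (max b c') (SubV (l ++ [x])) :=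
  maxOf_congr (fun z => (subV_snoc l x z).symm) (maxOf_or hb hc)

theorem maxOf_pre_step {xs : List Int} {h x : Int} (hh : MaxOf h (PreV xs)) :
    MaxOf (x + max 0 h) (PreV (x :: xs)) := by
  have h0 : MaxOf (max 0 h) (fun y => y = 0 ∨ PreV xs y) :=
    maxOf_or ⟨rfl, fun w hw => le_of_eq hw⟩ hh
  have h2 := maxOf_add (x := x) h0
  rw [show x + max 0 h = max 0 h + x by ring]
  refine maxOf_congr (fun z => ?_) h2
  rw [preV_cons]

-- ---- B-side invariant ----

theorem bFold_state (a : Int) (t : List Int) :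
    MaxOf (bFold a t).1 (SufV (a :: t)) ∧ MaxOf (bFold a t).2.1 (SubV (a :: t)) ∧
    (t = [] → (bFold a t).2.2 = (none, none)) ∧
    (t ≠ [] → ∃ c2 b2, (bFold a t).2.2.1 = some c2 ∧ (bFold a t).2.2.2 = some b2 ∧
       MaxOf c2 (Pair2V (a :: t)) ∧ MaxOf b2 (PairV (a :: t))) := by
  induction t using List.reverseRecOn with
  | nil =>
    refine ⟨?_, ?_, fun _ => rfl, fun h => absurd rfl h⟩
    · exact maxOf_congr (fun z => (sufV_singleton a z).symm) ⟨rfl, fun w hw => le_of_eq hw⟩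
    · exact maxOf_congr (fun z => (subV_singleton a z).symm) ⟨rfl, fun w hw => le_of_eq hw⟩
  | append_singleton t' x ih =>
    have hfold : bFold a (t' ++ [x]) = altStep (bFold a t') x := by
      unfold bFold
      rw [List.foldl_append]
      rfl
    have hl : a :: (t' ++ [x]) = (a :: t') ++ [x] := by simp
    rcases hst : bFold a t' with ⟨c1, b1, o2, ob2⟩
    rw [hst] at ih
    rcases ih with ⟨hc1, hb1, hnil, hsome⟩
    have hcur1 : MaxOf (max c1 0 + x) (SufV ((a :: t') ++ [x])) := by
      rw [max_comm]
      exact maxOf_suf_step hc1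
    have hbest1 : MaxOf (max b1 (max c1 0 + x)) (SubV ((a :: t') ++ [x])) :=
      maxOf_sub_step hb1 hcur1
    rw [hfold, hst, hl]
    rcases eq_or_ne t' [] with rfl | hne
    · obtain ⟨ho2, hob2⟩ : o2 = none ∧ ob2 = none := by
        have h22 := hnil rfl
        simp only [Prod.mk.injEq] at h22
        exact h22
      subst ho2 hob2
      have hP2 : MaxOf (b1 + x) (Pair2V ([a] ++ [x])) := by
        have h0 : MaxOf b1 (fun y => Pair2V [a] y ∨ SubV [a] y) :=
          maxOf_or_left_empty (fun y => not_pair2V_short (by simp) y) hb1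
        exact maxOf_congr (fun z => (pair2V_snoc _ x z).symm) (maxOf_add h0)
      have hPV : MaxOf (b1 + x) (PairV ([a] ++ [x])) :=
        maxOf_congr (fun z => (pairV_snoc _ x z).symm)
          (maxOf_or_left_empty (fun y => not_pairV_short (by simp) y) hP2)
      refine ⟨hcur1, hbest1, by simp, fun _ => ⟨x + b1, x + b1, rfl, rfl, ?_, ?_⟩⟩
      · rw [add_comm]; exact hP2
      · rw [add_comm]; exact hPV
    · obtain ⟨c2, b2, ho2, hob2, hc2, hb2⟩ := hsome hne
      subst ho2 hob2
      have h0 : MaxOf (max c2 b1) (fun y => Pair2V (a :: t') y ∨ SubV (a :: t') y) :=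
        maxOf_or hc2 hb1
      have hP2 : MaxOf (max c2 b1 + x) (Pair2V ((a :: t') ++ [x])) :=
        maxOf_congr (fun z => (pair2V_snoc _ x z).symm) (maxOf_add h0)
      have hPV : MaxOf (max b2 (max c2 b1 + x)) (PairV ((a :: t') ++ [x])) :=
        maxOf_congr (fun z => (pairV_snoc _ x z).symm) (maxOf_or hb2 hP2)
      refine ⟨hcur1, hbest1, by simp, fun _ => ⟨x + max c2 b1, max b2 (x + max c2 b1), rfl, rfl, ?_, ?_⟩⟩
      · rw [add_comm]; exact hP2
      · rw [add_comm x]; exact hPV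

-- ---- A-side: loop lemmas ----

theorem length_kl (c : Int) (l : List Int) : (kl c l).length = l.length := by
  induction l generalizing c with
  | nil => rfl
  | cons x xs ih => simp [kl, ih]

theorem length_kr (l : List Int) : (kr l).length = l.length := by
  induction l with
  | nil => rfl
  | cons x xs ih => simp [kr, ih]

theorem length_smx (l : List Int) : (smx l).length = l.length := by
  induction l with
  | nil => rfl
  | cons x xs ih => simp [smx, ih]

theorem getD_append_length (p : List Int) (x : Int) (q : List Int) :
    (p ++ x :: q).getD p.length 0 = x := by
  induction p with
  | nil => simp
  | cons y ys ih => simpa using ih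

theorem getD_append_len2 (p q : List Int) : (p ++ q).getD p.length 0 = q.getD 0 0 := by
  induction p with
  | nil => simp
  | cons y ys ih => simpa using ih

theorem set_append_length (p : List Int) (x : Int) (q : List Int) (v : Int) :
    (p ++ x :: q).set p.length v = p ++ v :: q := by
  induction p with
  | nil => simp
  | cons y ys ih => simpa using ih

theorem getD_of_drop {l : List Int} {k : Nat} {x : Int} {t : List Int}
    (h : l.drop k = x :: t) : l.getD k 0 = x := by
  induction l generalizing k with
  | nil => simp at h
  | cons y ys ih =>
    cases k with
    | zero =>
      rw [List.drop_zero] at h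
      cases h; simp
    | succ k => simp at h ⊢; exact ih h

theorem drop_succ_of_drop {l : List Int} {k : Nat} {x : Int} {t : List Int}
    (h : l.drop k = x :: t) : l.drop (k + 1) = t := by
  rw [← List.drop_drop, h]
  rfl

theorem loopUp1 (nums : List Int) (back f0 : List Int) (c : Int)
    (hdrop : nums.drop (f0.length + 1) = back)
    (hlen : f0.length + 1 + back.length = nums.length) :
    (PySem.List.pyRange ((f0.length : Int) + 1) ((nums.length : Int)) 1).foldl
      (fun mL i => PySem.List.pySetD mL i (max 0 (PySem.List.pyGetD mL (i-1) 0) + PySem.List.pyGetD nums i 0))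
      ((f0 ++ [c]) ++ List.replicate back.length 0)
    = (f0 ++ [c]) ++ kl c back := by
  induction back generalizing f0 c with
  | nil =>
    rw [PySem.List.pyRange_one_eq_nil (by simp at hlen; push_cast; omega)]
    simp [kl]
  | cons x bs ih =>
    have hlt : ((f0.length : Int) + 1) < (nums.length : Int) := by
      push_cast
      simp at hlen
      omega
    rw [PySem.List.pyRange_one_cons hlt, List.foldl_cons]
    have hcast : ((f0.length : Int) + 1) = ((f0.length + 1 : Nat) : Int) := by push_cast; ring
    have hgm : PySem.List.pyGetD ((f0 ++ [c]) ++ List.replicate (x :: bs).length 0)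
        (((f0.length : Int) + 1) - 1) 0 = c := by
      have h1 : ((f0.length : Int) + 1) - 1 = ((f0.length : Nat) : Int) := by ring
      rw [h1, PySem.List.pyGetD_natCast, List.append_assoc, List.singleton_append]
      exact getD_append_length f0 c _
    have hgn : PySem.List.pyGetD nums ((f0.length : Int) + 1) 0 = x := by
      rw [hcast, PySem.List.pyGetD_natCast]
      exact getD_of_drop hdrop
    have hset : ∀ v : Int, PySem.List.pySetD ((f0 ++ [c]) ++ List.replicate (x :: bs).length 0)
        ((f0.length : Int) + 1) v = (((f0 ++ [c]) ++ [v])) ++ List.replicate bs.length 0 := by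
      intro v
      rw [hcast, PySem.List.pySetD_natCast]
      have h2 : (f0 ++ [c]) ++ List.replicate (x :: bs).length 0
          = (f0 ++ [c]) ++ (0 :: List.replicate bs.length 0) := by rfl
      rw [h2]
      have h3 : f0.length + 1 = (f0 ++ [c]).length := by simp
      rw [h3, set_append_length]
      simp
    rw [hgm, hgn, hset]
    have ih' := ih (f0 ++ [c]) (max 0 c + x)
      (by rw [show (f0 ++ [c]).length + 1 = f0.length + 1 + 1 by simp]; exact drop_succ_of_drop hdrop)
      (by simp at hlen ⊢; omega)
    have hst : (((f0 ++ [c]).length : Int) + 1) = ((f0.length : Int) + 1) + 1 := by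
      simp
    rw [hst] at ih'
    rw [ih']
    simp [kl, List.append_assoc]

theorem loopUp2 (back f0 : List Int) (c : Int) (N : Nat)
    (hlen : f0.length + 1 + back.length = N) :
    (PySem.List.pyRange ((f0.length : Int) + 1) ((N : Int)) 1).foldl
      (fun mL i => PySem.List.pySetD mL i (max (PySem.List.pyGetD mL (i-1) 0) (PySem.List.pyGetD mL i 0)))
      ((f0 ++ [c]) ++ back)
    = (f0 ++ [c]) ++ pm c back := by
  induction back generalizing f0 c with
  | nil =>
    rw [PySem.List.pyRange_one_eq_nil (by simp at hlen; push_cast; omega)]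
    simp [pm]
  | cons x bs ih =>
    have hlt : ((f0.length : Int) + 1) < (N : Int) := by
      simp at hlen
      push_cast
      omega
    rw [PySem.List.pyRange_one_cons hlt, List.foldl_cons]
    have hcast : ((f0.length : Int) + 1) = ((f0.length + 1 : Nat) : Int) := by push_cast; ring
    have hgm : PySem.List.pyGetD ((f0 ++ [c]) ++ (x :: bs)) (((f0.length : Int) + 1) - 1) 0 = c := by
      have h1 : ((f0.length : Int) + 1) - 1 = ((f0.length : Nat) : Int) := by ring
      rw [h1, PySem.List.pyGetD_natCast, List.append_assoc, List.singleton_append]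
      exact getD_append_length f0 c _
    have hgx : PySem.List.pyGetD ((f0 ++ [c]) ++ (x :: bs)) ((f0.length : Int) + 1) 0 = x := by
      rw [hcast, PySem.List.pyGetD_natCast]
      rw [show f0.length + 1 = (f0 ++ [c]).length by simp]
      exact getD_append_length (f0 ++ [c]) x bs
    have hset : ∀ v : Int, PySem.List.pySetD ((f0 ++ [c]) ++ (x :: bs))
        ((f0.length : Int) + 1) v = ((f0 ++ [c]) ++ [v]) ++ bs := by
      intro v
      rw [hcast, PySem.List.pySetD_natCast]
      rw [show f0.length + 1 = (f0 ++ [c]).length by simp]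
      rw [set_append_length]
      simp
    rw [hgm, hgx, hset]
    have ih' := ih (f0 ++ [c]) (max c x) (by simp at hlen ⊢; omega)
    have hst : (((f0 ++ [c]).length : Int) + 1) = ((f0.length : Int) + 1) + 1 := by
      simp
    rw [hst] at ih'
    rw [ih']
    simp [pm, List.append_assoc]

theorem take_succ_getElem (l : List Int) (k : Nat) (h : k < l.length) :
    l.take (k+1) = l.take k ++ [l[k]] := by
  rw [List.take_add_one, List.getElem?_eq_getElem h]
  rfl

theorem loopDown1 (nums : List Int) (k : Nat) (hk : k < nums.length) :
    (PySem.List.pyRange ((k : Int) - 1) (-1) (-1)).foldl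
      (fun mR i => PySem.List.pySetD mR i (max 0 (PySem.List.pyGetD mR (i+1) 0) + PySem.List.pyGetD nums i 0))
      (List.replicate k 0 ++ kr (nums.drop k))
    = kr nums := by
  induction k with
  | zero =>
    rw [PySem.List.pyRange_neg_one_eq_nil (by norm_num)]
    simp
  | succ k ih =>
    have hkn : k < nums.length := by omega
    have hc0 : ((k + 1 : Nat) : Int) - 1 = (k : Int) := by push_cast; ring
    rw [hc0, PySem.List.pyRange_neg_one_cons (by push_cast; omega), List.foldl_cons]
    have hrepl : List.replicate (k+1) (0:Int) ++ kr (nums.drop (k+1))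
        = List.replicate k 0 ++ (0 :: kr (nums.drop (k+1))) := by
      rw [List.replicate_succ']
      simp
    have hg1 : PySem.List.pyGetD (List.replicate (k+1) (0:Int) ++ kr (nums.drop (k+1)))
        ((k : Int) + 1) 0 = (kr (nums.drop (k+1))).getD 0 0 := by
      rw [show ((k : Int) + 1) = ((k + 1 : Nat) : Int) by push_cast; ring, PySem.List.pyGetD_natCast]
      simpa using getD_append_len2 (List.replicate (k+1) (0:Int)) (kr (nums.drop (k+1)))
    have hg2 : PySem.List.pyGetD nums ((k : Int)) 0 = nums[k] := by
      rw [PySem.List.pyGetD_natCast]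
      exact List.getD_eq_getElem nums 0 hkn
    have hset : ∀ v : Int, PySem.List.pySetD (List.replicate (k+1) (0:Int) ++ kr (nums.drop (k+1)))
        ((k : Int)) v = List.replicate k 0 ++ (v :: kr (nums.drop (k+1))) := by
      intro v
      rw [PySem.List.pySetD_natCast, hrepl]
      simpa using set_append_length (List.replicate k (0:Int)) 0 (kr (nums.drop (k+1))) v
    rw [hg1, hg2, hset]
    have hkr : (max 0 ((kr (nums.drop (k+1))).getD 0 0) + nums[k]) :: kr (nums.drop (k+1))
        = kr (nums.drop k) := by
      rw [List.drop_eq_getElem_cons hkn]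
      rfl
    rw [hkr]
    exact ih hkn

theorem loopDown2 (K : List Int) (k : Nat) (hk : k < K.length) :
    (PySem.List.pyRange ((k : Int) - 1) (-1) (-1)).foldl
      (fun mR i => PySem.List.pySetD mR i (max (PySem.List.pyGetD mR (i+1) 0) (PySem.List.pyGetD mR i 0)))
      (K.take k ++ smx (K.drop k))
    = smx K := by
  induction k with
  | zero =>
    rw [PySem.List.pyRange_neg_one_eq_nil (by norm_num)]
    simp
  | succ k ih =>
    have hkn : k < K.length := by omega
    have hne : K.drop (k+1) ≠ [] := by
      rw [ne_eq, List.drop_eq_nil_iff]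
      omega
    obtain ⟨y, ys, hys⟩ := List.exists_cons_of_ne_nil
      (show smx (K.drop (k+1)) ≠ [] from
        List.ne_nil_of_length_pos (by rw [length_smx, List.length_drop]; omega))
    have hc0 : ((k + 1 : Nat) : Int) - 1 = (k : Int) := by push_cast; ring
    rw [hc0, PySem.List.pyRange_neg_one_cons (by push_cast; omega), List.foldl_cons]
    have htk : K.take (k+1) ++ smx (K.drop (k+1)) = K.take k ++ (K[k] :: smx (K.drop (k+1))) := by
      rw [take_succ_getElem K k hkn, List.append_assoc]
      rfl
    have hg1 : PySem.List.pyGetD (K.take (k+1) ++ smx (K.drop (k+1))) ((k : Int) + 1) 0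
        = (smx (K.drop (k+1))).getD 0 0 := by
      rw [show ((k : Int) + 1) = ((k + 1 : Nat) : Int) by push_cast; ring, PySem.List.pyGetD_natCast]
      have h := getD_append_len2 (K.take (k+1)) (smx (K.drop (k+1)))
      simpa [List.length_take, Nat.min_eq_left (show k+1 ≤ K.length by omega)] using h
    have hg2 : PySem.List.pyGetD (K.take (k+1) ++ smx (K.drop (k+1))) ((k : Int)) 0 = K[k] := by
      rw [PySem.List.pyGetD_natCast, htk]
      have h := getD_append_length (K.take k) (K[k]) (smx (K.drop (k+1)))
      simpa [List.length_take, Nat.min_eq_left (show k ≤ K.length by omega)] using h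
    have hset : ∀ v : Int, PySem.List.pySetD (K.take (k+1) ++ smx (K.drop (k+1))) ((k : Int)) v
        = K.take k ++ (v :: smx (K.drop (k+1))) := by
      intro v
      rw [PySem.List.pySetD_natCast, htk]
      have h := set_append_length (K.take k) (K[k]) (smx (K.drop (k+1))) v
      simpa [List.length_take, Nat.min_eq_left (show k ≤ K.length by omega)] using h
    rw [hg1, hg2, hset]
    have hsmx : (max ((smx (K.drop (k+1))).getD 0 0) K[k]) :: smx (K.drop (k+1)) = smx (K.drop k) := by
      rw [List.drop_eq_getElem_cons hkn]
      show _ = (max ((smx (K.drop (k+1))).getD 0 K[k]) K[k]) :: smx (K.drop (k+1))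
      rw [hys]
      simp
    rw [hsmx]
    exact ih hkn

theorem foldMax_props (L : List Int) (g : Int → Int) (r0 : Int) :
    r0 ≤ L.foldl (fun r i => max r (g i)) r0 ∧
    (∀ i ∈ L, g i ≤ L.foldl (fun r i => max r (g i)) r0) ∧
    (L.foldl (fun r i => max r (g i)) r0 = r0 ∨ ∃ i ∈ L, L.foldl (fun r i => max r (g i)) r0 = g i) := by
  induction L generalizing r0 with
  | nil => simp
  | cons y ys ih =>
    rcases ih (max r0 (g y)) with ⟨h1, h2, h3⟩
    refine ⟨le_trans (le_max_left _ _) h1, ?_, ?_⟩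
    · intro i hi
      rcases List.mem_cons.1 hi with rfl | hi
      · exact le_trans (le_max_right _ _) h1
      · exact h2 i hi
    · rcases h3 with h3 | ⟨i, hi, h3⟩
      · rcases le_total r0 (g y) with hc | hc
        · right
          exact ⟨y, List.mem_cons_self, by rw [List.foldl_cons, h3, max_eq_right hc]⟩
        · left
          rw [List.foldl_cons, h3, max_eq_left hc]
      · right
        exact ⟨i, List.mem_cons_of_mem _ hi, h3⟩

theorem klpm_entry (back : List Int) (p : List Int) (c b : Int)
    (hc : MaxOf c (SufV p)) (hb : MaxOf b (SubV p)) (t : Nat) (ht : t < back.length) :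
    MaxOf ((pm b (kl c back)).getD t 0) (SubV (p ++ back.take (t+1))) := by
  induction back generalizing p c b t with
  | nil => simp at ht
  | cons x bs ih =>
    have hc' : MaxOf (max 0 c + x) (SufV (p ++ [x])) := maxOf_suf_step hc
    cases t with
    | zero =>
      simpa [kl, pm] using maxOf_sub_step hb hc'
    | succ s =>
      have hs : s < bs.length := by simpa using ht
      have := ih (p ++ [x]) (max 0 c + x) (max b (max 0 c + x)) hc'
        (maxOf_sub_step hb hc') s hs
      simp only [kl, pm, List.getD_cons_succ]
      have harr : (p ++ [x]) ++ bs.take (s+1) = p ++ (x :: bs).take (s+1+1) := by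
        simp
      rwa [harr] at this

theorem kr_head (l : List Int) (h : l ≠ []) : MaxOf ((kr l).getD 0 0) (PreV l) := by
  induction l with
  | nil => exact absurd rfl h
  | cons x xs ih =>
    rcases eq_or_ne xs [] with rfl | hne
    · simp only [kr]
      refine maxOf_congr (fun z => (preV_singleton x z).symm) ?_
      simp [kr]
      exact ⟨rfl, fun w hw => le_of_eq hw⟩
    · have hh := ih hne
      have := maxOf_pre_step (x := x) hh
      rw [add_comm] at this
      simpa [kr] using this

theorem smx_head (l : List Int) (h : l ≠ []) : MaxOf ((smx (kr l)).getD 0 0) (SubV l) := by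
  induction l with
  | nil => exact absurd rfl h
  | cons x xs ih =>
    rcases eq_or_ne xs [] with rfl | hne
    · refine maxOf_congr (fun z => (subV_singleton x z).symm) ?_
      show MaxOf ((smx (kr [x])).getD 0 0) _
      have h1 : kr [x] = [x] := by
        show (max 0 ((kr []).getD 0 0) + x) :: kr [] = [x]
        show (max 0 ((0:Int)) + x) :: ([] : List Int) = [x]
        simp
      have h2 : smx [x] = [x] := by
        show (max ((smx []).getD 0 x) x) :: smx [] = [x]
        show (max x x) :: ([] : List Int) = [x]
        simp
      rw [h1, h2]
      exact ⟨rfl, fun w hw => le_of_eq hw⟩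
    · have hy0 := ih hne
      have hv := kr_head (x :: xs) (by simp)
      obtain ⟨y, ys, hys⟩ := List.exists_cons_of_ne_nil
        (show smx (kr xs) ≠ [] from
          List.ne_nil_of_length_pos (by rw [length_smx, length_kr]; exact List.length_pos_iff.mpr hne))
      have hkrx : (kr (x :: xs)).getD 0 0 = max 0 ((kr xs).getD 0 0) + x := rfl
      rw [hkrx] at hv
      have hy : MaxOf y (SubV xs) := by rwa [hys, List.getD_cons_zero] at hy0
      have hgoal : (smx (kr (x :: xs))).getD 0 0
          = max y (max 0 ((kr xs).getD 0 0) + x) := by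
        show (smx ((max 0 ((kr xs).getD 0 0) + x) :: kr xs)).getD 0 0 = _
        rw [show smx ((max 0 ((kr xs).getD 0 0) + x) :: kr xs)
            = max ((smx (kr xs)).getD 0 (max 0 ((kr xs).getD 0 0) + x)) (max 0 ((kr xs).getD 0 0) + x)
              :: smx (kr xs) from rfl]
        rw [List.getD_cons_zero, hys, List.getD_cons_zero]
      rw [hgoal, max_comm]
      exact maxOf_congr (fun z => (subV_cons x xs z).symm) (maxOf_or hv hy)

theorem smx_kr_entry (l : List Int) (i : Nat) (hi : i < l.length) :
    (smx (kr l)).getD i 0 = (smx (kr (l.drop i))).getD 0 0 := by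
  induction l generalizing i with
  | nil => simp at hi
  | cons x xs ih =>
    cases i with
    | zero => rfl
    | succ j =>
      simp only [kr, smx, List.getD_cons_succ, List.drop_succ_cons]
      exact ih j (by simpa using hi)

-- ---- main theorem ----

theorem pySetD_neg_one (xs : List Int) (v : Int) (h : xs ≠ []) :
    PySem.List.pySetD xs (-1) v = xs.set (xs.length - 1) v := by
  unfold PySem.List.pySetD PySem.List.pySet?
  simp [PySem.List.pyIdx?]
  rw [if_pos (show 1 ≤ xs.length from List.length_pos_iff.mpr h)]
  rfl

theorem kr_singleton (x : Int) : kr [x] = [x] := by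
  show (max 0 ((kr []).getD 0 0) + x) :: kr [] = [x]
  show (max 0 (0:Int) + x) :: ([] : List Int) = [x]
  simp

theorem smx_singleton (x : Int) : smx [x] = [x] := by
  show (max ((smx []).getD 0 x) x) :: smx [] = [x]
  show (max x x) :: ([] : List Int) = [x]
  simp

theorem drop_length_sub_one {l : List Int} (h : l ≠ []) :
    l.drop (l.length - 1) = [l.getLast h] := by
  conv_lhs => rw [← List.dropLast_append_getLast h]
  rw [List.drop_append_of_le_length (by simp [List.length_dropLast])]
  rw [List.drop_eq_nil_iff.mpr (by simp [List.length_dropLast])]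
  rfl

theorem EL (a : Int) (r : List Int) (m : Nat) (hm : m < r.length + 1) :
    MaxOf ((a :: pm a (kl a r)).getD m 0) (SubV ((a :: r).take (m+1))) := by
  cases m with
  | zero =>
    rw [List.getD_cons_zero]
    exact maxOf_congr (fun z => (subV_singleton a z).symm) ⟨rfl, fun w hw => le_of_eq hw⟩
  | succ t =>
    rw [List.getD_cons_succ]
    have h1 : MaxOf a (SufV [a]) :=
      maxOf_congr (fun z => (sufV_singleton a z).symm) ⟨rfl, fun w hw => le_of_eq hw⟩
    have h2 : MaxOf a (SubV [a]) :=
      maxOf_congr (fun z => (subV_singleton a z).symm) ⟨rfl, fun w hw => le_of_eq hw⟩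
    have := klpm_entry r [a] a a h1 h2 t (by omega)
    rwa [show [a] ++ r.take (t+1) = (a :: r).take (t+1+1) by simp] at this

theorem ER (l : List Int) (i : Nat) (hi : i < l.length) :
    MaxOf ((smx (kr l)).getD i 0) (SubV (l.drop i)) := by
  rw [smx_kr_entry l i hi]
  exact smx_head _ (by rw [ne_eq, List.drop_eq_nil_iff]; omega)

theorem main_eq (a : Int) (r : List Int) :
    maxTwoSubArrays (a :: r) = maxTwoSubArrays_alt (a :: r) := by
  rcases eq_or_ne r [] with rfl | hne
  · have hB : maxTwoSubArrays_alt [a] = 0 := rfl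
    have hA : maxTwoSubArrays [a] = 0 := by
      simp only [maxTwoSubArrays]
      norm_num
    rw [hA, hB]
  · -- loop-pass characterisations
    have hL1 := loopUp1 (a :: r) r [] a rfl (by simp; omega)
    simp only [List.nil_append, List.length_nil, Nat.cast_zero, zero_add,
      List.singleton_append] at hL1
    have hL2 := loopUp2 (kl a r) [] a (a :: r).length (by simp [length_kl]; omega)
    simp only [List.nil_append, List.length_nil, Nat.cast_zero, zero_add,
      List.singleton_append] at hL2
    have hD1 := loopDown1 (a :: r) ((a :: r).length - 1) (by simp)
    simp only [List.length_cons, Nat.add_sub_cancel] at hD1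
    rw [show ((r.length : Int)) - 1 = ((r.length : Int) + 1) - 2 by ring] at hD1
    have hD2 := loopDown2 (kr (a :: r)) ((kr (a :: r)).length - 1)
      (by rw [length_kr]; simp)
    have hkne : kr (a :: r) ≠ [] :=
      List.ne_nil_of_length_pos (by rw [length_kr]; simp)
    rw [drop_length_sub_one hkne, smx_singleton, ← List.dropLast_eq_take,
      List.dropLast_append_getLast hkne] at hD2
    rw [show (((kr (a :: r)).length - 1 : Nat) : Int) - 1 = ((r.length : Int) + 1) - 2 by
      rw [length_kr]; simp; omega] at hD2
    have hset1 : PySem.List.pySetD (List.replicate ((a :: r).length) (0 : Int)) (-1)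
        ((a :: r).getLast (by simp))
        = List.replicate r.length 0 ++ kr ((a :: r).drop r.length) := by
      rw [pySetD_neg_one _ _ (List.ne_nil_of_length_pos (by simp))]
      have hdl : (a :: r).drop r.length = [(a :: r).getLast (by simp)] := by
        have h := drop_length_sub_one (show (a :: r) ≠ [] by simp)
        simpa using h
      rw [hdl, kr_singleton]
      simp only [List.length_replicate, List.length_cons, Nat.add_sub_cancel,
        List.replicate_succ']
      have := set_append_length (List.replicate r.length (0 : Int)) 0 []
        ((a :: r).getLast (by simp))
      simpa using this
    -- evaluate port A into the final fold over the functional arrays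
    simp only [maxTwoSubArrays]
    rw [PySem.List.pyGetD_zero_cons]
    rw [show PySem.List.pySetD (List.replicate ((a :: r).length) (0 : Int)) 0 a
        = a :: List.replicate r.length 0 by
      simp [PySem.List.pySetD_of_nonneg, List.replicate_succ]]
    rw [show ((a :: r).length : Int) = ((r.length : Int) + 1) by rw [List.length_cons]; push_cast; ring]
    rw [show ((a :: r).length : Int) = ((r.length : Int) + 1) by rw [List.length_cons]; push_cast; ring] at hL1 hL2
    rw [hL1, hL2]
    rw [show PySem.List.pyGetD (a :: r) (-1) (0 : Int) = (a :: r).getLast (by simp) from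
      PySem.List.pyGetD_neg_one (a :: r) 0 (by simp)]
    rw [hset1, hD1, hD2]
    -- B's value
    obtain ⟨c2, b2, ho2, hob2, _hc2, hb2⟩ := (bFold_state a r).2.2.2 hne
    have hBval : maxTwoSubArrays_alt (a :: r) = max 0 b2 := by
      show (match (bFold a r).2.2.2 with
            | none => 0
            | some b => max 0 b) = max 0 b2
      rw [hob2]
    rw [hBval]
    -- the final fold and its properties
    obtain ⟨h0F, hmemF, hlastF⟩ := foldMax_props
      (PySem.List.pyRange 0 (((r.length : Int) + 1) - 1) 1)
      (fun i => PySem.List.pyGetD (a :: pm a (kl a r)) i 0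
        + PySem.List.pyGetD (smx (kr (a :: r))) (i + 1) 0) 0
    have hgi : ∀ i : Int, 0 ≤ i →
        PySem.List.pyGetD (a :: pm a (kl a r)) i 0
          + PySem.List.pyGetD (smx (kr (a :: r))) (i + 1) 0
        = (a :: pm a (kl a r)).getD i.toNat 0 + (smx (kr (a :: r))).getD (i.toNat + 1) 0 := by
      intro i h0i
      rw [show i = ((i.toNat : Nat) : Int) from (Int.toNat_of_nonneg h0i).symm]
      rw [show ((i.toNat : Nat) : Int) + 1 = ((i.toNat + 1 : Nat) : Int) by push_cast; ring]
      rw [PySem.List.pyGetD_natCast, PySem.List.pyGetD_natCast]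
      simp [List.getD_eq_getElem?_getD, max_eq_left h0i]
    -- every pair value is bounded by the fold
    have hup : ∀ w, PairV (a :: r) w →
        w ≤ (PySem.List.pyRange 0 (((r.length : Int) + 1) - 1) 1).foldl
          (fun res i => max res (PySem.List.pyGetD (a :: pm a (kl a r)) i 0
            + PySem.List.pyGetD (smx (kr (a :: r))) (i + 1) 0)) 0 := by
      rintro w ⟨m', sv, tv, hm', hs, ht, rfl⟩
      have hm'1 : 1 ≤ m' := by
        rcases Nat.eq_zero_or_pos m' with rfl | h
        · exact absurd (by simp) (SubV_ne_nil hs)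
        · exact h
      have hm'n : m' < (a :: r).length := by
        by_contra hc
        exact SubV_ne_nil ht (List.drop_eq_nil_iff.mpr (by omega))
      have hEL := EL a r (m' - 1) (by simp at hm'n ⊢; omega)
      rw [show (m' - 1) + 1 = m' by omega] at hEL
      have hER := ER (a :: r) m' hm'n
      have hmm : ((m' - 1 : Nat) : Int) ∈ PySem.List.pyRange 0 (((r.length : Int) + 1) - 1) 1 := by
        rw [PySem.List.mem_pyRange_one]
        constructor
        · exact Int.natCast_nonneg _
        · simp at hm'n
          omega
      refine le_trans ?_ (hmemF _ hmm)
      rw [hgi _ (Int.natCast_nonneg _)]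
      rw [Int.toNat_natCast]
      rw [show (m' - 1) + 1 = m' by omega]
      exact add_le_add (hEL.2 sv hs) (hER.2 tv ht)
    -- conclude: the fold equals max 0 b2
    apply le_antisymm
    · rcases hlastF with hF | ⟨i, hiL, hF⟩
      · rw [hF]
        exact le_max_left _ _
      · rw [hF]
        obtain ⟨hi0, hiN⟩ := PySem.List.mem_pyRange_one.mp hiL
        have hEL := EL a r i.toNat (by omega)
        have hER := ER (a :: r) (i.toNat + 1) (by simp; omega)
        have hPV : PairV (a :: r) ((a :: pm a (kl a r)).getD i.toNat 0
            + (smx (kr (a :: r))).getD (i.toNat + 1) 0) :=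
          ⟨i.toNat + 1, _, _, by simp; omega, hEL.1, hER.1, rfl⟩
        rw [hgi i hi0]
        exact le_trans (hb2.2 _ hPV) (le_max_right _ _)
    · exact max_le h0F (hup b2 hb2.1)

-- ===== VERDICT (by name: the statement is the Claim_ definition above) =====
theorem maxTwoSubArrays_spec : Claim_equal_maxTwoSubArrays := by
  intro nums _hdom hpre
  unfold Spec_maxTwoSubArrays
  match nums with
  | [] => exact absurd rfl hpre
  | a :: r => exact main_eq a r
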